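-- pv_equiv track=rewrite | github.com/chanjetomo/FSLR-using-PHCA | modules/module_ClassificationFunctions.py | fivefoldDivideData
-- ===== SOURCE A (Python) =====
-- import math
--
-- def fivefoldDivideData(FSLData, FSLTarget, n_folds=5):
--     """ Partitions the dataset for each class into five folds."""
--     fivefoldList_features, fivefoldList_labels = [], []
--     feat, lab = [], []
--     data_per_fold = math.ceil(len(FSLTarget)/n_folds)
--     cut = data_per_fold
--
--     for i in range(len(FSLTarget)):
--         if i < cut:
--             feat.append(FSLData[i]), lab.append(FSLTarget[i])
--         else:
--             fivefoldList_features.append(feat), fivefoldList_labels.append(lab)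
--             feat, lab = [], []
--             feat.append(FSLData[i]), lab.append(FSLTarget[i])
--             cut += data_per_fold
--
--     fivefoldList_features.append(feat), fivefoldList_labels.append(lab)
--     return fivefoldList_features, fivefoldList_labels
-- ===== SOURCE B (Python) =====
-- import math
--
-- def fivefoldDivideData(FSLData, FSLTarget, n_folds=5):
--     """Partitions the dataset into folds by slicing chunk boundaries."""
--     n = len(FSLTarget)
--     if n == 0:
--         return [[]], [[]]
--     d = math.ceil(n / n_folds)
--     feats = [[FSLData[i] for i in range(s, min(s + d, n))] for s in range(0, n, d)]
--     labs = [FSLTarget[s:s + d] for s in range(0, n, d)]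
--     return feats, labs
-- ===== Notes on version B (the rewrite author's own statement) =====
-- stated objective: simpler
-- what changed: B computes the chunk size once and builds each fold by slicing at the chunk boundaries (a comprehension over fold start positions), replacing A's per-element loop with a running cut threshold and mutable chunk accumulators.
-- outside the precondition, e.g. on fivefoldDivideData([[1], [2]], [1, 2], -1): A returns ([[], [[1]], [[2]]], [[], [1], [2]]), B returns ([], [])
import Mathlib
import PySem

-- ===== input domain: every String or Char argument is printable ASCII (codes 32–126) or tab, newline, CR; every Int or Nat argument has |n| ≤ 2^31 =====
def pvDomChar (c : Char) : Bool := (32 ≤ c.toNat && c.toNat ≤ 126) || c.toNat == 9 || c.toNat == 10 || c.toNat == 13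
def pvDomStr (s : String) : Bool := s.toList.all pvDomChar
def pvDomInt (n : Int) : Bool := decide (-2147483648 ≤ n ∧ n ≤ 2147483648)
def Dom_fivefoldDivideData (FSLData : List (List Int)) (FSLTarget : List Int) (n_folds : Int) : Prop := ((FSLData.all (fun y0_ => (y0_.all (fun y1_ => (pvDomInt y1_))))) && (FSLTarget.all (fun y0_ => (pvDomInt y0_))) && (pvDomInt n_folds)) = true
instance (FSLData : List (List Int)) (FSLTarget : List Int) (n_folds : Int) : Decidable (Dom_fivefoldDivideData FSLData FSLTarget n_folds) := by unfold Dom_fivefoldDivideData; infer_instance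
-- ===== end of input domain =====

-- B partitions by slicing at the chunk boundaries instead of A's per-element loop with a
-- running cut threshold; objective: simpler (same O(n) cost, no speed claim).

-- ===== PORT A =====
-- math.ceil(len(FSLTarget)/n_folds) is ported as exact integer ceiling division
-- -((-len) // n_folds), which is exact on the admitted sizes.
def fivefoldDivideData (FSLData : List (List Int)) (FSLTarget : List Int) (n_folds : Int) : List (List (List Int)) × List (List Int) :=
  let data_per_fold : Int := -(PySem.Int.floordiv (-(FSLTarget.length : Int)) n_folds)
  let st := (List.range FSLTarget.length).foldl
    (fun (st : List (List (List Int)) × List (List Int) × List (List Int) × List Int × Int) (i : Nat) =>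
      if (i : Int) < st.2.2.2.2 then
        (st.1, st.2.1, st.2.2.1 ++ [PySem.List.pyGetD FSLData (i : Int) []],
          st.2.2.2.1 ++ [PySem.List.pyGetD FSLTarget (i : Int) 0], st.2.2.2.2)
      else
        (st.1 ++ [st.2.2.1], st.2.1 ++ [st.2.2.2.1],
          [PySem.List.pyGetD FSLData (i : Int) []], [PySem.List.pyGetD FSLTarget (i : Int) 0],
          st.2.2.2.2 + data_per_fold))
    ([], [], [], [], data_per_fold)
  (st.1 ++ [st.2.2.1], st.2.1 ++ [st.2.2.2.1])

-- ===== PORT B =====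
def fivefoldDivideData_alt (FSLData : List (List Int)) (FSLTarget : List Int) (n_folds : Int) : List (List (List Int)) × List (List Int) :=
  let n : Int := (FSLTarget.length : Int)
  if n = 0 then ([[]], [[]])
  else
    let d : Int := -(PySem.Int.floordiv (-n) n_folds)
    ((PySem.List.pyRange 0 n d).map (fun s =>
        (PySem.List.pyRange s (min (s + d) n) 1).map (fun i => PySem.List.pyGetD FSLData i [])),
     (PySem.List.pyRange 0 n d).map (fun s => PySem.List.slice FSLTarget (some s) (some (s + d))))

-- ===== PRECONDITION & SPEC =====
-- Pre_ excludes non-positive n_folds (at n_folds = 0 the Python A raises ZeroDivisionError; a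
-- negative fold count is an unspecified corner on which A and B return different, equally
-- arbitrary degenerate partitions) and FSLData shorter than FSLTarget (A raises IndexError there).
def Pre_fivefoldDivideData (FSLData : List (List Int)) (FSLTarget : List Int) (n_folds : Int) : Prop :=
  1 ≤ n_folds ∧ FSLTarget.length ≤ FSLData.length
instance (FSLData : List (List Int)) (FSLTarget : List Int) (n_folds : Int) : Decidable (Pre_fivefoldDivideData FSLData FSLTarget n_folds) := by unfold Pre_fivefoldDivideData; infer_instance

def pvWitness_fivefoldDivideData : List (List Int) × List Int × Int := ([[1], [2], [3]], [1, 2, 3], 2)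

def Spec_fivefoldDivideData (FSLData : List (List Int)) (FSLTarget : List Int) (n_folds : Int) (out : List (List (List Int)) × List (List Int)) : Prop := out = fivefoldDivideData_alt FSLData FSLTarget n_folds
instance (FSLData : List (List Int)) (FSLTarget : List Int) (n_folds : Int) (out : List (List (List Int)) × List (List Int)) : Decidable (Spec_fivefoldDivideData FSLData FSLTarget n_folds out) := by unfold Spec_fivefoldDivideData; infer_instance

-- ===== CLAIM (what is proved, stated in full; the proofs are below) =====
def Claim_equal_fivefoldDivideData : Prop := ∀ (FSLData : List (List Int)) (FSLTarget : List Int) (n_folds : Int), Dom_fivefoldDivideData FSLData FSLTarget n_folds → Pre_fivefoldDivideData FSLData FSLTarget n_folds → Spec_fivefoldDivideData FSLData FSLTarget n_folds (fivefoldDivideData FSLData FSLTarget n_folds)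

-- ===== LEMMAS AND PROOFS =====

-- The two index-access functions both programs read the data through.
def pvF (D : List (List Int)) : Nat → List Int := fun i => PySem.List.pyGetD D (i : Int) []
def pvG (T : List Int) : Nat → Int := fun i => PySem.List.pyGetD T (i : Int) 0

-- The chunk size both ports compute (as a Nat).
def pvDN (T : List Int) (nf : Int) : Nat := (-(PySem.Int.floordiv (-(T.length : Int)) nf)).toNat

-- A's loop body, factored for the proofs (definitionally the lambda inside the port of A).
def pvStep {α β : Type} (f : Nat → α) (g : Nat → β) (d : Int)
    (st : List (List α) × List (List β) × List α × List β × Int) (i : Nat) :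
    List (List α) × List (List β) × List α × List β × Int :=
  if (i : Int) < st.2.2.2.2 then
    (st.1, st.2.1, st.2.2.1 ++ [f i], st.2.2.2.1 ++ [g i], st.2.2.2.2)
  else
    (st.1 ++ [st.2.2.1], st.2.1 ++ [st.2.2.2.1], [f i], [g i], st.2.2.2.2 + d)

-- Reference chunking: split xs into consecutive chunks of size d (last one possibly shorter).
def chunkList {α : Type} (d : Nat) (xs : List α) : List (List α) :=
  if _h : xs.length ≤ d ∨ d = 0 then [xs]
  else xs.take d :: chunkList d (xs.drop d)
termination_by xs.length
decreasing_by simp only [List.length_drop]; omega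

lemma chunkList_of_le {α : Type} (d : Nat) (xs : List α) (h : xs.length ≤ d) :
    chunkList d xs = [xs] := by
  rw [chunkList.eq_def, dif_pos (Or.inl h)]

lemma chunkList_of_gt {α : Type} (d : Nat) (xs : List α) (hd : 1 ≤ d) (h : d < xs.length) :
    chunkList d xs = xs.take d :: chunkList d (xs.drop d) := by
  rw [chunkList.eq_def, dif_neg (by omega)]

lemma pvTake_range' {m : Nat} : ∀ (n s : Nat), List.take m (List.range' s n) = List.range' s (min m n) := by
  induction m with
  | zero => intro n s; simp
  | succ m IH =>
    intro n s
    cases n with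
    | zero => simp
    | succ n => simp [List.range'_succ, Nat.succ_min_succ, IH]

-- Within a chunk (all remaining indices below the cut), A's loop only extends feat/lab.
lemma pvStep_fill {α β : Type} (f : Nat → α) (g : Nat → β) (d : Int) :
    ∀ (m a : Nat) (ff : List (List α)) (fl : List (List β)) (feat : List α) (lab : List β)
      (c : Nat), a + m ≤ c →
      (List.range' a m).foldl (pvStep f g d) (ff, fl, feat, lab, (c : Int)) =
        (ff, fl, feat ++ (List.range' a m).map f, lab ++ (List.range' a m).map g, (c : Int)) := by
  intro m
  induction m with
  | zero => intro a ff fl feat lab c h; simp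
  | succ m IH =>
    intro a ff fl feat lab c h
    have hac : ((a : Nat) : Int) < ((c : Nat) : Int) := by exact_mod_cast (show a < c by omega)
    rw [List.range'_succ, List.foldl_cons,
      show pvStep f g d (ff, fl, feat, lab, (c : Int)) a
          = (ff, fl, feat ++ [f a], lab ++ [g a], (c : Int)) from by simp [pvStep, hac]]
    rw [IH (a + 1) ff fl (feat ++ [f a]) (lab ++ [g a]) c (by omega)]
    simp

-- From a chunk boundary (next index = cut), A's loop produces exactly the chunk decomposition.
lemma pvStep_run {α β : Type} (f : Nat → α) (g : Nat → β) (dn : Nat) (hd : 1 ≤ dn) :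
    ∀ (m : Nat), 1 ≤ m → ∀ (a : Nat) (ff : List (List α)) (fl : List (List β))
      (feat : List α) (lab : List β),
      (((List.range' a m).foldl (pvStep f g (dn : Int)) (ff, fl, feat, lab, (a : Int))).1
          ++ [((List.range' a m).foldl (pvStep f g (dn : Int)) (ff, fl, feat, lab, (a : Int))).2.2.1],
       ((List.range' a m).foldl (pvStep f g (dn : Int)) (ff, fl, feat, lab, (a : Int))).2.1
          ++ [((List.range' a m).foldl (pvStep f g (dn : Int)) (ff, fl, feat, lab, (a : Int))).2.2.2.1])
        = (ff ++ feat :: chunkList dn ((List.range' a m).map f),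
           fl ++ lab :: chunkList dn ((List.range' a m).map g)) := by
  intro m
  induction m using Nat.strong_induction_on with
  | _ m IH =>
    intro hm a ff fl feat lab
    obtain ⟨m', rfl⟩ : ∃ m', m = m' + 1 := ⟨m - 1, by omega⟩
    have hstep : pvStep f g (dn : Int) (ff, fl, feat, lab, (a : Int)) a
        = (ff ++ [feat], fl ++ [lab], [f a], [g a], ((a + dn : Nat) : Int)) := by
      simp [pvStep]
    rw [List.range'_succ, List.foldl_cons, hstep]
    obtain ⟨d', rfl⟩ : ∃ d', dn = d' + 1 := ⟨dn - 1, by omega⟩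
    by_cases hle : m' + 1 ≤ d' + 1
    · rw [pvStep_fill f g ((d' + 1 : Nat) : Int) m' (a + 1) _ _ _ _ (a + (d' + 1)) (by omega)]
      rw [chunkList_of_le (d' + 1) ((a :: List.range' (a + 1) m').map f) (by simp; omega),
          chunkList_of_le (d' + 1) ((a :: List.range' (a + 1) m').map g) (by simp; omega)]
      simp
    · have hsplit : List.range' (a + 1) m' = List.range' (a + 1) d' ++ List.range' (a + (d' + 1)) (m' - d') := by
        have h1 : d' + (m' - d') = m' := by omega
        have h2 : (a + 1) + 1 * d' = a + (d' + 1) := by omega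
        calc List.range' (a + 1) m' = List.range' (a + 1) (d' + (m' - d')) := by rw [h1]
          _ = List.range' (a + 1) d' ++ List.range' ((a + 1) + 1 * d') (m' - d') :=
              List.range'_append.symm
          _ = List.range' (a + 1) d' ++ List.range' (a + (d' + 1)) (m' - d') := by rw [h2]
      rw [hsplit, List.foldl_append]
      rw [pvStep_fill f g ((d' + 1 : Nat) : Int) d' (a + 1) _ _ _ _ (a + (d' + 1)) (by omega)]
      rw [IH (m' - d') (by omega) (by omega) (a + (d' + 1)) (ff ++ [feat]) (fl ++ [lab])
          ([f a] ++ (List.range' (a + 1) d').map f) ([g a] ++ (List.range' (a + 1) d').map g)]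
      simp only [List.map_cons, List.map_append]
      rw [chunkList_of_gt (d' + 1)
            (f a :: ((List.range' (a + 1) d').map f ++ (List.range' (a + (d' + 1)) (m' - d')).map f))
            (by omega) (by simp; omega),
          chunkList_of_gt (d' + 1)
            (g a :: ((List.range' (a + 1) d').map g ++ (List.range' (a + (d' + 1)) (m' - d')).map g))
            (by omega) (by simp; omega)]
      rw [List.take_succ_cons, List.drop_succ_cons,
          List.take_succ_cons, List.drop_succ_cons,
          List.take_left' (by simp), List.take_left' (by simp),
          List.drop_left' (by simp), List.drop_left' (by simp)]
      simp

-- chunkList as a map over chunk start positions.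
lemma chunkList_eq_map {α : Type} (dn : Nat) (hd : 1 ≤ dn) :
    ∀ (n : Nat) (xs : List α), xs.length = n → 1 ≤ n →
      chunkList dn xs = (List.range ((n + dn - 1) / dn)).map (fun k => (xs.drop (k * dn)).take dn) := by
  intro n
  induction n using Nat.strong_induction_on with
  | _ n IH =>
    intro xs hlen hn
    by_cases hle : n ≤ dn
    · rw [chunkList_of_le dn xs (by omega)]
      have hN : (n + dn - 1) / dn = 1 :=
        Nat.div_eq_of_lt_le (by omega) (by omega)
      rw [hN]
      simp [List.take_of_length_le (show xs.length ≤ dn by omega)]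
    · rw [chunkList_of_gt dn xs hd (by omega)]
      have h1 : n + dn - 1 = (n - dn + dn - 1) + dn := by omega
      rw [h1, Nat.add_div_right _ (by omega : 0 < dn), List.range_succ_eq_map]
      simp only [List.map_cons, List.map_map]
      congr 1
      · simp
      · rw [IH (n - dn) (by omega) (xs.drop dn) (by simp [hlen]) (by omega)]
        apply List.map_congr_left
        intro k _
        simp only [Function.comp_apply, List.drop_drop]
        have e : Nat.succ k * dn = dn + k * dn := by rw [Nat.succ_mul, Nat.add_comm]
        rw [e]

-- the label-access map reproduces the target list itself
lemma pvMapG_eq (T : List Int) : (List.range T.length).map (pvG T) = T := by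
  apply List.ext_getElem (by simp)
  intro i h1 h2
  rw [List.getElem_map, List.getElem_range]
  show PySem.List.pyGetD T ((i : Nat) : Int) 0 = T[i]
  rw [PySem.List.pyGetD_natCast, List.getD_eq_getElem T 0 h2]

lemma pvD_pos (T : List Int) (nf : Int) (hnf : 1 ≤ nf) (h0 : T.length ≠ 0) :
    1 ≤ -(PySem.Int.floordiv (-(T.length : Int)) nf) := by
  have h := (PySem.Int.floordiv_lt_iff_lt_mul (a := -(T.length : Int)) (q := 0)
      (by omega : (0 : Int) < nf)).mpr (by simp; omega)
  omega

lemma pvDN_cast (T : List Int) (nf : Int) (hnf : 1 ≤ nf) (h0 : T.length ≠ 0) :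
    ((pvDN T nf : Nat) : Int) = -(PySem.Int.floordiv (-(T.length : Int)) nf) := by
  have := pvD_pos T nf hnf h0
  exact Int.toNat_of_nonneg (by omega)

-- A computes the chunk decomposition of the index maps.
lemma pvA_eq (D : List (List Int)) (T : List Int) (nf : Int) (hnf : 1 ≤ nf) (h0 : T.length ≠ 0) :
    fivefoldDivideData D T nf =
      (chunkList (pvDN T nf) ((List.range T.length).map (pvF D)),
       chunkList (pvDN T nf) ((List.range T.length).map (pvG T))) := by
  have hd1 := pvD_pos T nf hnf h0
  have hdc := pvDN_cast T nf hnf h0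
  have hdn1 : 1 ≤ pvDN T nf := by omega
  have hA0 : fivefoldDivideData D T nf =
      (((List.range T.length).foldl
            (pvStep (pvF D) (pvG T) (-(PySem.Int.floordiv (-(T.length : Int)) nf)))
            ([], [], [], [], -(PySem.Int.floordiv (-(T.length : Int)) nf))).1
          ++ [((List.range T.length).foldl
            (pvStep (pvF D) (pvG T) (-(PySem.Int.floordiv (-(T.length : Int)) nf)))
            ([], [], [], [], -(PySem.Int.floordiv (-(T.length : Int)) nf))).2.2.1],
       ((List.range T.length).foldl
            (pvStep (pvF D) (pvG T) (-(PySem.Int.floordiv (-(T.length : Int)) nf)))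
            ([], [], [], [], -(PySem.Int.floordiv (-(T.length : Int)) nf))).2.1
          ++ [((List.range T.length).foldl
            (pvStep (pvF D) (pvG T) (-(PySem.Int.floordiv (-(T.length : Int)) nf)))
            ([], [], [], [], -(PySem.Int.floordiv (-(T.length : Int)) nf))).2.2.2.1]) := rfl
  rw [hA0, ← hdc, List.range_eq_range']
  by_cases hle : T.length ≤ pvDN T nf
  · rw [pvStep_fill (pvF D) (pvG T) ((pvDN T nf : Nat) : Int) T.length 0 [] [] [] []
        (pvDN T nf) (by omega)]
    rw [chunkList_of_le (pvDN T nf) ((List.range' 0 T.length).map (pvF D)) (by simp; omega),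
        chunkList_of_le (pvDN T nf) ((List.range' 0 T.length).map (pvG T)) (by simp; omega)]
    simp
  · have hsplit : List.range' 0 T.length
        = List.range' 0 (pvDN T nf) ++ List.range' (pvDN T nf) (T.length - pvDN T nf) := by
      have h1 : pvDN T nf + (T.length - pvDN T nf) = T.length := by omega
      have h2 : 0 + 1 * pvDN T nf = pvDN T nf := by omega
      calc List.range' 0 T.length
          = List.range' 0 (pvDN T nf + (T.length - pvDN T nf)) := by rw [h1]
        _ = List.range' 0 (pvDN T nf) ++ List.range' (0 + 1 * pvDN T nf) (T.length - pvDN T nf) :=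
            List.range'_append.symm
        _ = List.range' 0 (pvDN T nf) ++ List.range' (pvDN T nf) (T.length - pvDN T nf) := by
            rw [h2]
    rw [hsplit, List.foldl_append]
    rw [pvStep_fill (pvF D) (pvG T) ((pvDN T nf : Nat) : Int) (pvDN T nf) 0 [] [] [] []
        (pvDN T nf) (by omega)]
    simp only [List.nil_append]
    rw [pvStep_run (pvF D) (pvG T) (pvDN T nf) hdn1 (T.length - pvDN T nf) (by omega)
        (pvDN T nf) [] [] ((List.range' 0 (pvDN T nf)).map (pvF D))
        ((List.range' 0 (pvDN T nf)).map (pvG T))]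
    simp only [List.map_append]
    rw [chunkList_of_gt (pvDN T nf)
          ((List.range' 0 (pvDN T nf)).map (pvF D)
            ++ (List.range' (pvDN T nf) (T.length - pvDN T nf)).map (pvF D)) hdn1 (by simp; omega),
        chunkList_of_gt (pvDN T nf)
          ((List.range' 0 (pvDN T nf)).map (pvG T)
            ++ (List.range' (pvDN T nf) (T.length - pvDN T nf)).map (pvG T)) hdn1 (by simp; omega)]
    rw [List.take_left' (by simp), List.take_left' (by simp),
        List.drop_left' (by simp), List.drop_left' (by simp)]
    simp

-- B computes the same chunk decomposition.
lemma pvB_eq (D : List (List Int)) (T : List Int) (nf : Int) (hnf : 1 ≤ nf) (h0 : T.length ≠ 0) :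
    fivefoldDivideData_alt D T nf =
      (chunkList (pvDN T nf) ((List.range T.length).map (pvF D)),
       chunkList (pvDN T nf) T) := by
  have hd1 := pvD_pos T nf hnf h0
  have hdc := pvDN_cast T nf hnf h0
  have hdn1 : 1 ≤ pvDN T nf := by omega
  have hne : ¬ ((T.length : Int) = 0) := by omega
  simp only [fivefoldDivideData_alt]
  rw [if_neg hne, ← hdc]
  rw [PySem.List.pyRange_of_pos 0 (T.length : Int) (by omega : (0 : Int) < ((pvDN T nf : Nat) : Int))]
  rw [if_pos (by omega : (0 : Int) < (T.length : Int))]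
  have hN : ((((T.length : Int) - 0 + ((pvDN T nf : Nat) : Int) - 1) / ((pvDN T nf : Nat) : Int)).toNat)
      = (T.length + pvDN T nf - 1) / pvDN T nf := by
    have h1 : ((T.length : Int) - 0 + ((pvDN T nf : Nat) : Int) - 1)
        = ((T.length + pvDN T nf - 1 : Nat) : Int) := by omega
    rw [h1, ← Int.natCast_ediv, Int.toNat_natCast]
  rw [hN]
  rw [chunkList_eq_map (pvDN T nf) hdn1 T.length ((List.range T.length).map (pvF D)) (by simp)
        (by omega),
      chunkList_eq_map (pvDN T nf) hdn1 T.length T rfl (by omega)]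
  congr 1
  · rw [List.map_map]
    apply List.map_congr_left
    intro k _
    simp only [Function.comp_apply]
    have hs : (0 : Int) + ((pvDN T nf : Nat) : Int) * (k : Int) = ((k * pvDN T nf : Nat) : Int) := by
      push_cast; ring
    rw [hs]
    rw [PySem.List.pyRange_one]
    have hm : ((min (((k * pvDN T nf : Nat) : Int) + ((pvDN T nf : Nat) : Int)) ((T.length : Int)))
          - ((k * pvDN T nf : Nat) : Int)).toNat = min (pvDN T nf) (T.length - k * pvDN T nf) := by
      omega
    rw [hm]
    rw [← List.map_drop, ← List.map_take,
        show List.range T.length = List.range' 0 T.length from List.range_eq_range',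
        List.drop_range', pvTake_range']
    rw [show 0 + k * pvDN T nf * 1 = k * pvDN T nf from by omega]
    rw [List.range'_eq_map_range, List.map_map, List.map_map]
    apply List.map_congr_left
    intro j _
    simp only [Function.comp_apply]
    show PySem.List.pyGetD D (((k * pvDN T nf : Nat) : Int) + ((j : Nat) : Int)) []
        = pvF D (k * pvDN T nf + j)
    show PySem.List.pyGetD D (((k * pvDN T nf : Nat) : Int) + ((j : Nat) : Int)) []
        = PySem.List.pyGetD D ((k * pvDN T nf + j : Nat) : Int) []
    norm_cast
  · rw [List.map_map]
    apply List.map_congr_left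
    intro k _
    simp only [Function.comp_apply]
    have hs : (0 : Int) + ((pvDN T nf : Nat) : Int) * (k : Int) = ((k * pvDN T nf : Nat) : Int) := by
      push_cast; ring
    rw [hs]
    exact PySem.List.slice_natCast_add T (k * pvDN T nf) (pvDN T nf)

-- ===== VERDICT (by name: the statement is the Claim_ definition above) =====
theorem fivefoldDivideData_spec : Claim_equal_fivefoldDivideData := by
  intro D T nf _dom hpre
  obtain ⟨hnf, _hlen⟩ := hpre
  unfold Spec_fivefoldDivideData
  by_cases h0 : T.length = 0
  · have hT : T = [] := List.eq_nil_of_length_eq_zero h0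
    subst hT
    simp [fivefoldDivideData, fivefoldDivideData_alt]
  · rw [pvA_eq D T nf hnf h0, pvB_eq D T nf hnf h0, pvMapG_eq]
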